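-- pv_equiv track=rewrite | github.com/vhromakov/sim | cfmesh/vtk_to_internal_edges_ply.py | parse_polydata_lines_to_edges
-- ===== SOURCE A (Python) =====
-- from typing import Iterable, List, Tuple, Set
--
-- def parse_polydata_lines_to_edges(lines: Iterable[int]) -> List[Tuple[int, int]]:
--     """
--     VTK "lines" array format:
--       [n, p0, p1, ..., pn-1,  n, q0, q1, ...,]
--     For each polyline, emit edges between consecutive points.
--     """
--     lines = list(lines)
--     edges: List[Tuple[int, int]] = []
--     i = 0
--     L = len(lines)
--     while i < L:
--         n = lines[i]
--         i += 1
--         if n <= 1: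
--             i += max(n, 0)
--             continue
--         pts = lines[i : i + n]
--         i += n
--         for a, b in zip(pts, pts[1:]):
--             if a != b:
--                 edges.append((int(a), int(b)))
--     return edges
-- ===== SOURCE B (Python) =====
-- def parse_polydata_lines_to_edges(lines):
--     # Streaming state machine: consume one element at a time; no index
--     # arithmetic, no slicing. States: 'H' expect a header, 'S' skip k
--     # elements (degenerate header), 'T' expect k more points, remembering
--     # the previous point to emit an edge when it differs from the current.
--     edges = []
--     mode = 'H'
--     k = 0
--     prev = None
--     for x in lines:
--         if mode == 'H':
--             if x <= 1:
--                 k = max(x, 0)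
--                 if k > 0:
--                     mode = 'S'
--             else:
--                 k = x
--                 prev = None
--                 mode = 'T'
--         elif mode == 'S':
--             k -= 1
--             if k == 0:
--                 mode = 'H'
--         else:  # mode == 'T'
--             if prev is not None and prev != x:
--                 edges.append((int(prev), int(x)))
--             prev = x
--             k -= 1
--             if k == 0:
--                 mode = 'H'
--     return edges
-- ===== Notes on version B (the rewrite author's own statement) =====
-- stated objective: alternative
-- what changed: Replaces A's index-and-slice counted parse (while loop, lines[i:i+n], zip of a slice with its tail) with a streaming state machine that consumes one element at a time with states header/skip/take and a remembered previous point, emitting each edge on the fly.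
import Mathlib
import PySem

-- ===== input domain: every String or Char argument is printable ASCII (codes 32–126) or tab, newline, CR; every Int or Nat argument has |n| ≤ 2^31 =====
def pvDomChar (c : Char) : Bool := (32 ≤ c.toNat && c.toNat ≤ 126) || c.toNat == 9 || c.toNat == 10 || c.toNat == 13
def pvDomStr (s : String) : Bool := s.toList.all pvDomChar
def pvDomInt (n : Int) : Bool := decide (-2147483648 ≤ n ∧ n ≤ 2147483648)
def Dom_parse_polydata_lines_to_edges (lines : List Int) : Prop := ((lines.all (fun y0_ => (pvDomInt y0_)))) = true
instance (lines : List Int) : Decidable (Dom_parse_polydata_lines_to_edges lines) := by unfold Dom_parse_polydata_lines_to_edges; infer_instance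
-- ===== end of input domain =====

-- ===== PORT A =====
-- B replaces the index/slice parse by a per-element state machine; same values, no speed claim.
-- (Python's max(n, 0))
def pyMax (a b : Int) : Int := if a ≤ b then b else a

-- A's while loop; `i` only ever grows by nonnegative amounts from 0, so it is a Nat.
-- lines[i] with 0 ≤ i < L is List.getD; lines[i:i+n] with 0 ≤ i ≤ i+n and Python's clamping of a
-- too-long slice is exactly (drop (i+1)).take n.toNat in the n ≥ 2 branch — exact here.
def goA (lines : List Int) (L : Nat) (i : Nat) (edges : List (Int × Int)) : List (Int × Int) :=
  if h : i < L then
    if lines.getD i 0 ≤ 1 then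
      goA lines L (i + 1 + (pyMax (lines.getD i 0) 0).toNat) edges
    else
      goA lines L (i + 1 + (lines.getD i 0).toNat)
        ((((lines.drop (i + 1)).take (lines.getD i 0).toNat).zip
            ((lines.drop (i + 1)).take (lines.getD i 0).toNat).tail).foldl
          (fun acc p => if p.1 ≠ p.2 then acc ++ [p] else acc) edges)
  else edges
termination_by L - i
decreasing_by all_goals omega

def parse_polydata_lines_to_edges (lines : List Int) : List (Int × Int) :=
  goA lines lines.length 0 []

-- ===== PORT B =====
-- B's state machine: expecting a header, skipping k elements, or taking k more
-- points while remembering the previous point (None right after the header).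
inductive BState where
  | header : BState
  | skip : Int → BState
  | take : Int → Option Int → BState
deriving DecidableEq, Repr

-- one step of the for-loop body, consuming one element x
def stepB (s : BState × List (Int × Int)) (x : Int) : BState × List (Int × Int) :=
  match s with
  | (BState.header, es) =>
      if x ≤ 1 then
        let k := pyMax x 0
        if k > 0 then (BState.skip k, es) else (BState.header, es)
      else (BState.take x none, es)
  | (BState.skip k, es) =>
      if k - 1 = 0 then (BState.header, es) else (BState.skip (k - 1), es)
  | (BState.take k prev, es) =>
      let es' := match prev with
        | some a => if a ≠ x then es ++ [(a, x)] else es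
        | none => es
      if k - 1 = 0 then (BState.header, es') else (BState.take (k - 1) (some x), es')

def parse_polydata_lines_to_edges_alt (lines : List Int) : List (Int × Int) :=
  (lines.foldl stepB (BState.header, [])).2

-- ===== PRECONDITION & SPEC =====
def Spec_parse_polydata_lines_to_edges (lines : List Int) (out : List (Int × Int)) : Prop := out = parse_polydata_lines_to_edges_alt lines
instance (lines : List Int) (out : List (Int × Int)) : Decidable (Spec_parse_polydata_lines_to_edges lines out) := by unfold Spec_parse_polydata_lines_to_edges; infer_instance

-- ===== CLAIM (what is proved, stated in full; the proofs are below) =====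
def Claim_equal_parse_polydata_lines_to_edges : Prop := ∀ (lines : List Int), Dom_parse_polydata_lines_to_edges lines → Spec_parse_polydata_lines_to_edges lines (parse_polydata_lines_to_edges lines)

-- ===== LEMMAS AND PROOFS =====

-- consecutive-edge list of (a :: l), dropping equal neighbours
def fEdges (a : Int) : List Int → List (Int × Int)
  | [] => []
  | x :: t => (if a ≠ x then [(a, x)] else []) ++ fEdges x t

-- A's inner zip-fold equals edges ++ fEdges over the slice
theorem zipfold_eq_fEdges (t : List Int) : ∀ (x : Int) (edges : List (Int × Int)),
    (((x :: t).zip t).foldl (fun acc p => if p.1 ≠ p.2 then acc ++ [p] else acc) edges)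
      = edges ++ fEdges x t := by
  induction t with
  | nil => intro x edges; simp [fEdges]
  | cons y t ih =>
      intro x edges
      simp only [List.zip_cons_cons, List.foldl_cons, fEdges]
      rw [ih]
      by_cases h : x ≠ y <;> simp [h]

-- running from a skip state over the whole rest = running from header over the drop
theorem foldB_skip (l : List Int) : ∀ (k : Int) (es : List (Int × Int)), 0 < k →
    (l.foldl stepB (BState.skip k, es)).2 = ((l.drop k.toNat).foldl stepB (BState.header, es)).2 := by
  induction l with
  | nil => intro k es _; simp
  | cons x l ih =>
      intro k es hk
      simp only [List.foldl_cons, stepB]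
      by_cases h1 : k - 1 = 0
      · have : k.toNat = 1 := by omega
        simp [h1, this]
      · have hk1 : 0 < k - 1 := by omega
        rw [if_neg h1, ih _ _ hk1]
        have : k.toNat = (k - 1).toNat + 1 := by omega
        rw [this, List.drop_succ_cons]

-- running from a take state with a remembered point = edges of the taken prefix, then header over the drop
theorem foldB_take (l : List Int) : ∀ (k a : Int) (es : List (Int × Int)), 0 < k →
    (l.foldl stepB (BState.take k (some a), es)).2
      = ((l.drop k.toNat).foldl stepB (BState.header, es ++ fEdges a (l.take k.toNat))).2 := by
  induction l with
  | nil => intro k a es _; simp [fEdges]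
  | cons x l ih =>
      intro k a es hk
      simp only [List.foldl_cons, stepB]
      have htn : k.toNat = (k - 1).toNat + 1 := by omega
      by_cases h1 : k - 1 = 0
      · have : k.toNat = 1 := by omega
        simp only [if_pos h1, this, List.take_succ_cons, List.take_zero, List.drop_succ_cons,
          List.drop_zero, fEdges]
        by_cases h : a ≠ x <;> simp [h]
      · have hk1 : 0 < k - 1 := by omega
        rw [if_neg h1, ih _ _ _ hk1, htn, List.drop_succ_cons, List.take_succ_cons]
        simp only [fEdges]
        by_cases h : a ≠ x <;> simp [h, List.append_assoc]

-- main invariant: A's fused loop from index i = B's fold from the header state over the suffix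
theorem goA_eq_foldB (lines : List Int) (i : Nat) (edges : List (Int × Int)) :
    goA lines lines.length i edges = ((lines.drop i).foldl stepB (BState.header, edges)).2 := by
  rw [goA]
  by_cases h : i < lines.length
  · have hdrop : lines.drop i = lines.getD i 0 :: lines.drop (i + 1) := by
      rw [List.getD_eq_getElem _ _ h, List.drop_eq_getElem_cons h]
    set n := lines.getD i 0 with hn
    rw [dif_pos h, hdrop]
    simp only [List.foldl_cons, stepB]
    by_cases hle : n ≤ 1
    · rw [if_pos hle]
      simp only [if_pos hle]
      by_cases hk : pyMax n 0 > 0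
      · rw [if_pos hk, goA_eq_foldB, foldB_skip _ _ _ hk, List.drop_drop]
      · have h0 : (pyMax n 0).toNat = 0 := by
          simp only [pyMax] at hk ⊢; split_ifs at hk ⊢ <;> omega
        rw [if_neg hk, goA_eq_foldB, h0]
    · -- n ≥ 2 branch
      rw [if_neg hle]
      simp only [if_neg hle]
      have hn2 : (2:Int) ≤ n := by omega
      have hn1 : n - 1 ≠ 0 := by omega
      rcases hrest : lines.drop (i + 1) with _ | ⟨x, rest⟩
      · -- slice is empty: i + 1 ≥ length, pts = []
        have hlen : lines.length ≤ i + 1 := by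
          have := congrArg List.length hrest; simp at this; omega
        simp only [List.take_nil, List.zip_nil_left, List.foldl_nil]
        rw [goA, dif_neg (by omega)]
      · have htk : n.toNat = (n.toNat - 1) + 1 := by omega
        have hts : List.take n.toNat (x :: rest) = x :: List.take (n.toNat - 1) rest := by
          rw [htk, List.take_succ_cons]; simp
        rw [hts, List.tail_cons, zipfold_eq_fEdges, goA_eq_foldB]
        simp only [List.foldl_cons, stepB, if_neg hn1]
        rw [foldB_take _ _ _ _ (by omega : (0:Int) < n - 1)]
        have h1 : (n - 1).toNat = n.toNat - 1 := by omega
        have h2 : lines.drop (i + 1 + n.toNat) = rest.drop (n.toNat - 1) := by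
          rw [← List.drop_drop, hrest, htk, List.drop_succ_cons]; simp
        rw [h1, h2]
  · rw [dif_neg h]
    rw [List.drop_eq_nil_of_le (by omega)]
    simp
termination_by lines.length - i
decreasing_by all_goals omega

-- ===== VERDICT (by name: the statement is the Claim_ definition above) =====
theorem parse_polydata_lines_to_edges_spec : Claim_equal_parse_polydata_lines_to_edges := by
  intro lines _
  unfold Spec_parse_polydata_lines_to_edges parse_polydata_lines_to_edges parse_polydata_lines_to_edges_alt
  rw [goA_eq_foldB, List.drop_zero]
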